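-- pv_equiv track=rewrite | github.com/trishtr/schema_mapper | src/app/services/embedding/config/business_rules.py | get_compatible_types
-- ===== SOURCE A (Python) =====
-- from typing import Dict, List, Any, Optional
--
-- DATA_TYPE_COMPATIBILITY = {
--     "VARCHAR": ["VARCHAR", "TEXT", "CHAR", "STRING"],
--     "INTEGER": ["INTEGER", "BIGINT", "SMALLINT", "INT"],
--     "FLOAT": ["FLOAT", "DOUBLE", "DECIMAL", "NUMERIC"],
--     "DATE": ["DATE", "TIMESTAMP", "DATETIME"],
--     "BOOLEAN": ["BOOLEAN", "BOOL", "BIT"],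
--     "TIMESTAMP": ["TIMESTAMP", "DATETIME", "DATE"],
--     "TEXT": ["TEXT", "VARCHAR", "CHAR", "STRING"],
--     "NUMERIC": ["NUMERIC", "DECIMAL", "FLOAT", "DOUBLE"]
-- }
--
-- def get_compatible_types(data_type: str) -> List[str]:
--     """Get list of compatible data types."""
--     data_type = data_type.upper()
--
--     # Check direct compatibility
--     if data_type in DATA_TYPE_COMPATIBILITY:
--         return DATA_TYPE_COMPATIBILITY[data_type]
--
--     # Check reverse compatibility
--     for base_type, compatible_types in DATA_TYPE_COMPATIBILITY.items():
--         if data_type in compatible_types: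
--             return [base_type] + compatible_types
--
--     return [data_type]
-- ===== SOURCE B (Python) =====
-- from typing import Dict, List, Any, Optional
--
-- DATA_TYPE_COMPATIBILITY = {
--     "VARCHAR": ["VARCHAR", "TEXT", "CHAR", "STRING"],
--     "INTEGER": ["INTEGER", "BIGINT", "SMALLINT", "INT"],
--     "FLOAT": ["FLOAT", "DOUBLE", "DECIMAL", "NUMERIC"],
--     "DATE": ["DATE", "TIMESTAMP", "DATETIME"],
--     "BOOLEAN": ["BOOLEAN", "BOOL", "BIT"],
--     "TIMESTAMP": ["TIMESTAMP", "DATETIME", "DATE"],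
--     "TEXT": ["TEXT", "VARCHAR", "CHAR", "STRING"],
--     "NUMERIC": ["NUMERIC", "DECIMAL", "FLOAT", "DOUBLE"]
-- }
--
-- # Reverse index built once at module load: first-insertion-order base wins for
-- # member types (setdefault), then direct keys overwrite so a direct hit has priority.
-- _INDEX: Dict[str, List[str]] = {}
-- for _base, _compat in DATA_TYPE_COMPATIBILITY.items():
--     for _t in _compat:
--         _INDEX.setdefault(_t, [_base] + _compat)
-- for _base, _compat in DATA_TYPE_COMPATIBILITY.items():
--     _INDEX[_base] = _compat
--
-- def get_compatible_types(data_type: str) -> List[str]: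
--     """Get list of compatible data types."""
--     dt = data_type.upper()
--     return _INDEX.get(dt, [dt])
-- ===== Notes on version B (the rewrite author's own statement) =====
-- stated objective: idiomatic
-- what changed: Replaces the per-call direct check plus linear scan over all compatibility lists with a reverse index dict precomputed once at module load (setdefault for first-match-wins, direct keys overwritten last), so the function body is a single dict lookup.
import Mathlib
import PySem

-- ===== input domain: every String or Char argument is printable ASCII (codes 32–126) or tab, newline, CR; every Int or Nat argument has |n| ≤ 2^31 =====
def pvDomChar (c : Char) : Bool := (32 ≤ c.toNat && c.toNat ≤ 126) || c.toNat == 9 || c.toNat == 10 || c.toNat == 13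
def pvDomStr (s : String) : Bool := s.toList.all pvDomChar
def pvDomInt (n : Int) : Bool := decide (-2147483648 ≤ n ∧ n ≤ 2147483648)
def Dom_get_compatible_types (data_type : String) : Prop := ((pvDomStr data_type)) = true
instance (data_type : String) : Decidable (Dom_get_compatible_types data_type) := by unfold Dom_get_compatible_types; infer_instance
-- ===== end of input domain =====

-- B replaces A's per-call direct check + linear scan by a reverse index dict built once
-- (setdefault = first-insertion-order base wins, direct keys overwritten last), so the
-- function is a single lookup; objective: more idiomatic, same observable results.

-- ===== PORT A =====
def DATA_TYPE_COMPATIBILITY : PySem.Dict String (List String) := PySem.Dict.ofList [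
  ("VARCHAR", ["VARCHAR", "TEXT", "CHAR", "STRING"]),
  ("INTEGER", ["INTEGER", "BIGINT", "SMALLINT", "INT"]),
  ("FLOAT", ["FLOAT", "DOUBLE", "DECIMAL", "NUMERIC"]),
  ("DATE", ["DATE", "TIMESTAMP", "DATETIME"]),
  ("BOOLEAN", ["BOOLEAN", "BOOL", "BIT"]),
  ("TIMESTAMP", ["TIMESTAMP", "DATETIME", "DATE"]),
  ("TEXT", ["TEXT", "VARCHAR", "CHAR", "STRING"]),
  ("NUMERIC", ["NUMERIC", "DECIMAL", "FLOAT", "DOUBLE"])]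

-- the 'for base_type, compatible_types in DATA_TYPE_COMPATIBILITY.items()' loop with its early return
def reverseScan (dt : String) : List (String × List String) → List String
  | [] => [dt]
  | (base_type, compatible_types) :: rest =>
      if compatible_types.contains dt then base_type :: compatible_types
      else reverseScan dt rest

def get_compatible_types (data_type : String) : List String :=
  let dt := PySem.Str.upper data_type
  match PySem.Dict.get? DATA_TYPE_COMPATIBILITY dt with
  | some l => l
  | none => reverseScan dt DATA_TYPE_COMPATIBILITY.items

-- ===== PORT B =====
-- the two module-load loops of Source B: setdefault pass over every member, then direct overwrite
def pvIndex : PySem.Dict String (List String) :=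
  let d := DATA_TYPE_COMPATIBILITY.items.foldl
    (fun d p => p.2.foldl (fun d t => PySem.Dict.setdefault d t (p.1 :: p.2)) d)
    PySem.Dict.empty
  DATA_TYPE_COMPATIBILITY.items.foldl (fun d p => PySem.Dict.insert d p.1 p.2) d

def get_compatible_types_alt (data_type : String) : List String :=
  let dt := PySem.Str.upper data_type
  PySem.Dict.getD pvIndex dt [dt]

-- ===== PRECONDITION & SPEC =====
def Spec_get_compatible_types (data_type : String) (out : List String) : Prop := out = get_compatible_types_alt data_type
instance (data_type : String) (out : List String) : Decidable (Spec_get_compatible_types data_type out) := by unfold Spec_get_compatible_types; infer_instance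

-- ===== CLAIM (what is proved, stated in full; the proofs are below) =====
def Claim_equal_get_compatible_types : Prop := ∀ (data_type : String), Dom_get_compatible_types data_type → Spec_get_compatible_types data_type (get_compatible_types data_type)

-- ===== LEMMAS AND PROOFS =====

-- all type names occurring anywhere in the table
def pvAllNames : List String :=
  ["VARCHAR", "TEXT", "CHAR", "STRING", "INTEGER", "BIGINT", "SMALLINT", "INT",
   "FLOAT", "DOUBLE", "DECIMAL", "NUMERIC", "DATE", "TIMESTAMP", "DATETIME",
   "BOOLEAN", "BOOL", "BIT"]

-- literal normal forms of the two dicts, proved once by computation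
set_option maxRecDepth 8192 in
theorem DTC_eq : DATA_TYPE_COMPATIBILITY = PySem.Dict.mk [
  ("VARCHAR", ["VARCHAR", "TEXT", "CHAR", "STRING"]),
  ("INTEGER", ["INTEGER", "BIGINT", "SMALLINT", "INT"]),
  ("FLOAT", ["FLOAT", "DOUBLE", "DECIMAL", "NUMERIC"]),
  ("DATE", ["DATE", "TIMESTAMP", "DATETIME"]),
  ("BOOLEAN", ["BOOLEAN", "BOOL", "BIT"]),
  ("TIMESTAMP", ["TIMESTAMP", "DATETIME", "DATE"]),
  ("TEXT", ["TEXT", "VARCHAR", "CHAR", "STRING"]),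
  ("NUMERIC", ["NUMERIC", "DECIMAL", "FLOAT", "DOUBLE"])] := by decide

set_option maxRecDepth 8192 in
theorem pvIndex_eq : pvIndex = PySem.Dict.mk [
  ("VARCHAR", ["VARCHAR", "TEXT", "CHAR", "STRING"]),
  ("TEXT", ["TEXT", "VARCHAR", "CHAR", "STRING"]),
  ("CHAR", ["VARCHAR", "VARCHAR", "TEXT", "CHAR", "STRING"]),
  ("STRING", ["VARCHAR", "VARCHAR", "TEXT", "CHAR", "STRING"]),
  ("INTEGER", ["INTEGER", "BIGINT", "SMALLINT", "INT"]),
  ("BIGINT", ["INTEGER", "INTEGER", "BIGINT", "SMALLINT", "INT"]),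
  ("SMALLINT", ["INTEGER", "INTEGER", "BIGINT", "SMALLINT", "INT"]),
  ("INT", ["INTEGER", "INTEGER", "BIGINT", "SMALLINT", "INT"]),
  ("FLOAT", ["FLOAT", "DOUBLE", "DECIMAL", "NUMERIC"]),
  ("DOUBLE", ["FLOAT", "FLOAT", "DOUBLE", "DECIMAL", "NUMERIC"]),
  ("DECIMAL", ["FLOAT", "FLOAT", "DOUBLE", "DECIMAL", "NUMERIC"]),
  ("NUMERIC", ["NUMERIC", "DECIMAL", "FLOAT", "DOUBLE"]),
  ("DATE", ["DATE", "TIMESTAMP", "DATETIME"]),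
  ("TIMESTAMP", ["TIMESTAMP", "DATETIME", "DATE"]),
  ("DATETIME", ["DATE", "DATE", "TIMESTAMP", "DATETIME"]),
  ("BOOLEAN", ["BOOLEAN", "BOOL", "BIT"]),
  ("BOOL", ["BOOLEAN", "BOOLEAN", "BOOL", "BIT"]),
  ("BIT", ["BOOLEAN", "BOOLEAN", "BOOL", "BIT"])] := by decide

-- core lemma: both bodies agree as functions of the already-uppercased string
set_option maxRecDepth 8192 in
theorem body_eq (u : String) :
    (match PySem.Dict.get? DATA_TYPE_COMPATIBILITY u with
     | some l => l
     | none => reverseScan u DATA_TYPE_COMPATIBILITY.items)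
    = PySem.Dict.getD pvIndex u [u] := by
  rw [DTC_eq, pvIndex_eq]
  by_cases h : u ∈ pvAllNames
  · simp only [pvAllNames, List.mem_cons, List.not_mem_nil, or_false] at h
    rcases h with rfl|rfl|rfl|rfl|rfl|rfl|rfl|rfl|rfl|rfl|rfl|rfl|rfl|rfl|rfl|rfl|rfl|rfl <;> decide
  · simp only [pvAllNames, List.mem_cons, List.not_mem_nil, or_false, not_or] at h
    obtain ⟨h1, h2, h3, h4, h5, h6, h7, h8, h9, h10, h11, h12, h13, h14, h15, h16, h17, h18⟩ := h
    have b1 : (_ == u) = false := beq_eq_false_iff_ne.mpr (Ne.symm h1)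
    have c1 : (u == _) = false := beq_eq_false_iff_ne.mpr h1
    have b2 : (_ == u) = false := beq_eq_false_iff_ne.mpr (Ne.symm h2)
    have c2 : (u == _) = false := beq_eq_false_iff_ne.mpr h2
    have b3 : (_ == u) = false := beq_eq_false_iff_ne.mpr (Ne.symm h3)
    have c3 : (u == _) = false := beq_eq_false_iff_ne.mpr h3
    have b4 : (_ == u) = false := beq_eq_false_iff_ne.mpr (Ne.symm h4)
    have c4 : (u == _) = false := beq_eq_false_iff_ne.mpr h4
    have b5 : (_ == u) = false := beq_eq_false_iff_ne.mpr (Ne.symm h5)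
    have c5 : (u == _) = false := beq_eq_false_iff_ne.mpr h5
    have b6 : (_ == u) = false := beq_eq_false_iff_ne.mpr (Ne.symm h6)
    have c6 : (u == _) = false := beq_eq_false_iff_ne.mpr h6
    have b7 : (_ == u) = false := beq_eq_false_iff_ne.mpr (Ne.symm h7)
    have c7 : (u == _) = false := beq_eq_false_iff_ne.mpr h7
    have b8 : (_ == u) = false := beq_eq_false_iff_ne.mpr (Ne.symm h8)
    have c8 : (u == _) = false := beq_eq_false_iff_ne.mpr h8
    have b9 : (_ == u) = false := beq_eq_false_iff_ne.mpr (Ne.symm h9)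
    have c9 : (u == _) = false := beq_eq_false_iff_ne.mpr h9
    have b10 : (_ == u) = false := beq_eq_false_iff_ne.mpr (Ne.symm h10)
    have c10 : (u == _) = false := beq_eq_false_iff_ne.mpr h10
    have b11 : (_ == u) = false := beq_eq_false_iff_ne.mpr (Ne.symm h11)
    have c11 : (u == _) = false := beq_eq_false_iff_ne.mpr h11
    have b12 : (_ == u) = false := beq_eq_false_iff_ne.mpr (Ne.symm h12)
    have c12 : (u == _) = false := beq_eq_false_iff_ne.mpr h12
    have b13 : (_ == u) = false := beq_eq_false_iff_ne.mpr (Ne.symm h13)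
    have c13 : (u == _) = false := beq_eq_false_iff_ne.mpr h13
    have b14 : (_ == u) = false := beq_eq_false_iff_ne.mpr (Ne.symm h14)
    have c14 : (u == _) = false := beq_eq_false_iff_ne.mpr h14
    have b15 : (_ == u) = false := beq_eq_false_iff_ne.mpr (Ne.symm h15)
    have c15 : (u == _) = false := beq_eq_false_iff_ne.mpr h15
    have b16 : (_ == u) = false := beq_eq_false_iff_ne.mpr (Ne.symm h16)
    have c16 : (u == _) = false := beq_eq_false_iff_ne.mpr h16
    have b17 : (_ == u) = false := beq_eq_false_iff_ne.mpr (Ne.symm h17)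
    have c17 : (u == _) = false := beq_eq_false_iff_ne.mpr h17
    have b18 : (_ == u) = false := beq_eq_false_iff_ne.mpr (Ne.symm h18)
    have c18 : (u == _) = false := beq_eq_false_iff_ne.mpr h18
    simp [PySem.Dict.get?, PySem.Dict.getD,
      reverseScan, List.find?, List.contains, List.elem,
      b1, b2, b3, b4, b5, b6, b7, b8, b9, b10, b11, b12, b13, b14, b15, b16, b17, b18, c1, c2, c3, c4, c5, c6, c7, c8, c9, c10, c11, c12, c13, c14, c15, c16, c17, c18]

-- ===== VERDICT (by name: the statement is the Claim_ definition above) =====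
theorem get_compatible_types_spec : Claim_equal_get_compatible_types := by
  intro data_type _
  unfold Spec_get_compatible_types get_compatible_types get_compatible_types_alt
  exact body_eq (PySem.Str.upper data_type)
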